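-- pv_equiv track=rewrite | github.com/daniagongora/repo-escuela | analisis/tareapares.py | maxEvenSumPair
-- ===== SOURCE A (Python) =====
-- def maxEvenSumPair(arr, n) :
--
--     result = 0;
--     for i in range(n - 1) :
--         for j in range(i + 1, n) :
--
--             # Calculate the sum for each
--             # pair
--             temporal = arr[i] + arr[j];
--
--             # If sum is even than consider
--             # it for result
--             if (temporal % 2 == 0) :
--
--                 # Maintain maximum pair
--                 # sum in result
--                 result = max(result, temporal);
--
--     # If result is zero that means
--     # no pair with even sum is present
--     if (result == 0) :
--         return -1;
--
--     return result;
-- ===== SOURCE B (Python) =====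
-- def maxEvenSumPair(arr, n):
--     # One backward pass: pair each element with the largest same-parity
--     # element to its right; an even pair sum needs matching parities.
--     best = 0
--     best_even = None
--     best_odd = None
--     for x in reversed(arr[:max(n, 0)]):
--         if x % 2 == 0:
--             if best_even is not None and x + best_even > best:
--                 best = x + best_even
--             if best_even is None or best_even < x:
--                 best_even = x
--         else:
--             if best_odd is not None and x + best_odd > best:
--                 best = x + best_odd
--             if best_odd is None or best_odd < x:
--                 best_odd = x
--     return best if best != 0 else -1
-- ===== Notes on version B (the rewrite author's own statement) =====
-- stated objective: faster
-- what changed: Replaces the all-pairs double loop with a single backward pass that pairs each element with the largest same-parity element to its right (an even pair sum requires equal parities).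
import Mathlib
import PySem

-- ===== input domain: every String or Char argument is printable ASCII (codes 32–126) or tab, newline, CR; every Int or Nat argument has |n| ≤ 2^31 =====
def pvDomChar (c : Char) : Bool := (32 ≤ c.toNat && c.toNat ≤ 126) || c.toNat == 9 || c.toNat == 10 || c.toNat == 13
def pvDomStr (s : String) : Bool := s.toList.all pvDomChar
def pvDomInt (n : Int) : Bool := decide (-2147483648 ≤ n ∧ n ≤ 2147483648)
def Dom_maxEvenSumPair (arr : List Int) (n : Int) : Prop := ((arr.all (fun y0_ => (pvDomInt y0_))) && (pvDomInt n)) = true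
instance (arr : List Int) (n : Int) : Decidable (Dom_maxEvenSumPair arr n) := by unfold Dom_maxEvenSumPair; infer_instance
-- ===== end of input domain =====

-- B replaces A's all-pairs double loop by one backward pass pairing each element with the
-- largest same-parity element to its right (objective: faster).

-- ===== PORT A =====
def maxEvenSumPair (arr : List Int) (n : Int) : Int :=
  let result : Int :=
    (PySem.List.pyRange 0 (n - 1) 1).foldl
      (fun result i =>
        (PySem.List.pyRange (i + 1) n 1).foldl
          (fun result j =>
            let temporal := PySem.List.pyGetD arr i 0 + PySem.List.pyGetD arr j 0
            if PySem.Int.mod temporal 2 == 0 then max result temporal else result)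
          result)
      0
  if result == 0 then -1 else result

-- ===== PORT B =====
-- loop body of Source B: state is (best, best_even, best_odd)
def altStep (st : Int × Option Int × Option Int) (x : Int) : Int × Option Int × Option Int :=
  let best := st.1
  let be := st.2.1
  let bo := st.2.2
  if PySem.Int.mod x 2 == 0 then
    let best := match be with
      | some e => if best < x + e then x + e else best
      | none => best
    let be := match be with
      | some e => if e < x then some x else some e
      | none => some x
    (best, be, bo)
  else
    let best := match bo with
      | some v => if best < x + v then x + v else best
      | none => best
    let bo := match bo with
      | some v => if v < x then some x else some v
      | none => some x
    (best, be, bo)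

def maxEvenSumPair_alt (arr : List Int) (n : Int) : Int :=
  -- arr[:max(n, 0)] has a nonnegative bound, so List.take is exact here; reversed(·) is List.reverse
  let st := ((arr.take (max n 0).toNat).reverse).foldl altStep (0, none, none)
  if st.1 != 0 then st.1 else -1

-- ===== PRECONDITION & SPEC =====
-- Pre_ excludes exactly the inputs where A raises IndexError (n ≥ 2 with len(arr) < n); B returns
-- the max even pair sum of arr[:n]'s available elements there.
def Pre_maxEvenSumPair (arr : List Int) (n : Int) : Prop := n ≤ (arr.length : Int) ∨ n ≤ 1
instance (arr : List Int) (n : Int) : Decidable (Pre_maxEvenSumPair arr n) := by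
  unfold Pre_maxEvenSumPair; infer_instance
def pvWitness_maxEvenSumPair : List Int × Int := ([2, 4, 6], 3)

def Spec_maxEvenSumPair (arr : List Int) (n : Int) (out : Int) : Prop := out = maxEvenSumPair_alt arr n
instance (arr : List Int) (n : Int) (out : Int) : Decidable (Spec_maxEvenSumPair arr n out) := by
  unfold Spec_maxEvenSumPair; infer_instance

-- ===== CLAIM (what is proved, stated in full; the proofs are below) =====
def Claim_equal_maxEvenSumPair : Prop := ∀ (arr : List Int) (n : Int), Dom_maxEvenSumPair arr n → Pre_maxEvenSumPair arr n → Spec_maxEvenSumPair arr n (maxEvenSumPair arr n)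

-- ===== LEMMAS AND PROOFS =====

-- A's inner loop body, as a fold over the list of later elements
def pfold (x : Int) (ys : List Int) (r : Int) : Int :=
  ys.foldl (fun r y => if PySem.Int.mod (x + y) 2 == 0 then max r (x + y) else r) r

-- A's double loop, as structural recursion on the processed prefix
def aRec : List Int → Int → Int
  | [], r => r
  | x :: xs, r => aRec xs (pfold x xs r)

-- max element of the given parity (p = 0 or 1), shaped like altStep's update
def pmax (p : Int) : List Int → Option Int
  | [] => none
  | y :: ys =>
    if y % 2 == p then
      match pmax p ys with
      | none => some y
      | some m => if m < y then some y else some m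
    else pmax p ys

lemma pfold_cons (x y : Int) (ys : List Int) (r : Int) :
    pfold x (y :: ys) r = pfold x ys (if PySem.Int.mod (x + y) 2 == 0 then max r (x + y) else r) := by
  simp only [pfold, List.foldl_cons]

lemma par_cond (x y : Int) : (PySem.Int.mod (x + y) 2 == 0) = (y % 2 == x % 2) := by
  rw [PySem.Int.mod_eq_emod_of_pos (by norm_num)]
  by_cases h : (x + y) % 2 = 0
  · have h2 : y % 2 = x % 2 := by omega
    simp [h, h2]
  · have h2 : ¬ (y % 2 = x % 2) := by omega
    simp [h, h2]

lemma pf_acc (x : Int) : ∀ (ys : List Int) (r s : Int), pfold x ys (max r s) = max (pfold x ys r) s := by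
  intro ys
  induction ys with
  | nil => intro r s; simp [pfold]
  | cons y ys ih =>
    intro r s
    rw [pfold_cons, pfold_cons]
    by_cases h : (PySem.Int.mod (x + y) 2 == 0) = true
    · rw [if_pos h, if_pos h, show max (max r s) (x + y) = max (max r (x + y)) s from by omega, ih]
    · rw [if_neg h, if_neg h, ih]

lemma a_acc : ∀ (xs : List Int) (r s : Int), aRec xs (max r s) = max (aRec xs r) s := by
  intro xs
  induction xs with
  | nil => intro r s; simp [aRec]
  | cons x xs ih =>
    intro r s
    simp only [aRec]
    rw [pf_acc, ih]

lemma pfold_eq_pmax (x : Int) : ∀ (ys : List Int) (r : Int),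
    pfold x ys r = (match pmax (x % 2) ys with
                    | none => r
                    | some m => max r (x + m)) := by
  intro ys
  induction ys with
  | nil => intro r; simp [pfold, pmax]
  | cons y ys ih =>
    intro r
    rw [pfold_cons, par_cond]
    by_cases h : y % 2 = x % 2
    · rw [if_pos (by simp [h]), ih]
      simp only [pmax, show (y % 2 == x % 2) = true from by simp [h], if_pos rfl]
      cases hp : pmax (x % 2) ys with
      | none => simp
      | some m =>
        show max (max r (x + y)) (x + m) =
          match (if m < y then some y else some m : Option Int) with
          | none => r
          | some m' => max r (x + m')
        by_cases hmy : m < y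
        · rw [if_pos hmy]
          show max (max r (x + y)) (x + m) = max r (x + y)
          omega
        · rw [if_neg hmy]
          show max (max r (x + y)) (x + m) = max r (x + m)
          omega
    · rw [if_neg (by simp [h]), ih]
      simp [pmax, show (y % 2 == x % 2) = false from by simp [h]]

-- B's backward pass computes (A's loop value, max even, max odd)
lemma alt_invariant : ∀ (l : List Int),
    l.foldr (fun x st => altStep st x) ((0 : Int), (none : Option Int), (none : Option Int)) =
      (aRec l 0, pmax 0 l, pmax 1 l) := by
  intro l
  induction l with
  | nil => simp [aRec, pmax]
  | cons x xs ih =>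
    rw [List.foldr_cons, ih]
    have hmod : PySem.Int.mod x 2 = x % 2 := PySem.Int.mod_eq_emod_of_pos (by norm_num)
    have hbest : aRec (x :: xs) 0 =
        (match pmax (x % 2) xs with
         | none => aRec xs 0
         | some m => if aRec xs 0 < x + m then x + m else aRec xs 0) := by
      simp only [aRec]
      rw [pfold_eq_pmax]
      cases hp : pmax (x % 2) xs with
      | none => simp
      | some m =>
        simp only
        rw [a_acc xs 0 (x + m)]
        by_cases hlt : aRec xs 0 < x + m
        · rw [if_pos hlt]; omega
        · rw [if_neg hlt]; omega
    have hx2 : x % 2 = 0 ∨ x % 2 = 1 := by omega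
    rcases hx2 with hx0 | hx1
    · have hc : (PySem.Int.mod x 2 == 0) = true := by simp [hmod, hx0]
      simp only [altStep, hc, if_pos rfl]
      refine Prod.ext ?_ (Prod.ext ?_ ?_)
      · simp only [hbest, hx0]
        cases hp : pmax 0 xs <;> simp
      · simp only [pmax, show (x % 2 == 0) = true from by simp [hx0], if_pos rfl]
        cases hp : pmax 0 xs <;> simp
      · simp only [pmax, show (x % 2 == 1) = false from by simp [hx0]]
        simp
    · have hc : (PySem.Int.mod x 2 == 0) = false := by simp [hmod, hx1]
      simp only [altStep, hc, Bool.false_eq_true, if_false]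
      refine Prod.ext ?_ (Prod.ext ?_ ?_)
      · simp only [hbest, hx1]
        cases hp : pmax 1 xs <;> simp
      · simp only [pmax, show (x % 2 == 0) = false from by simp [hx1]]
        simp
      · simp only [pmax, show (x % 2 == 1) = true from by simp [hx1], if_pos rfl]
        cases hp : pmax 1 xs <;> simp

-- inner loop of A over pyRange (b, n) equals a fold over the corresponding sublist of arr.take n
lemma inner_fold (arr : List Int) (n : Int) (hn0 : 0 ≤ n) (hn : n ≤ (arr.length : Int))
    (F : Int → Int → Int) (b : Int) (hb : 0 ≤ b) (r : Int) :
    (PySem.List.pyRange b n 1).foldl (fun r j => F r (PySem.List.pyGetD arr j 0)) r =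
      ((arr.take n.toNat).drop b.toNat).foldl F r := by
  have hlen : ((arr.take n.toNat).length : Int) = n := by
    simp [List.length_take]; omega
  have h1 : (PySem.List.pyRange b n 1).foldl
      (fun r j => F r (PySem.List.pyGetD (arr.take n.toNat) j 0)) r =
      ((arr.take n.toNat).drop b.toNat).foldl F r := by
    have h2 := PySem.List.foldl_pyRange_pyGetD (arr.take n.toNat) 0 F r hb
    rw [show PySem.List.len (arr.take n.toNat) = n from by rw [PySem.List.len_eq, hlen]] at h2
    exact h2
  rw [← h1]
  apply PySem.List.foldl_congr_mem
  intro acc j hj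
  rw [PySem.List.mem_pyRange_one] at hj
  have hj0 : 0 ≤ j := le_trans hb hj.1
  rw [PySem.List.pyGetD_eq_getElem _ 0 hj0 (by omega),
      PySem.List.pyGetD_eq_getElem _ 0 hj0 (by omega)]
  congr 1
  exact List.getElem_take.symm

-- A's double loop over ranges equals aRec on the prefix arr.take n
lemma outer_fold (arr : List Int) (n : Int) (hn0 : 0 ≤ n) (hn : n ≤ (arr.length : Int)) :
    ∀ (d : List Int) (a r : Int), 0 ≤ a → d = (arr.take n.toNat).drop a.toNat →
    (PySem.List.pyRange a (n - 1) 1).foldl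
      (fun result i =>
        (PySem.List.pyRange (i + 1) n 1).foldl
          (fun result j =>
            let temporal := PySem.List.pyGetD arr i 0 + PySem.List.pyGetD arr j 0
            if PySem.Int.mod temporal 2 == 0 then max result temporal else result)
          result)
      r = aRec d r := by
  have hlen : (arr.take n.toNat).length = n.toNat := by
    simp [List.length_take]; omega
  intro d
  induction d with
  | nil =>
    intro a r ha hd
    have hge : n.toNat ≤ a.toNat := by
      by_contra hlt
      push_neg at hlt
      have hne : (arr.take n.toNat).drop a.toNat ≠ [] := by
        apply List.ne_nil_of_length_pos
        simp [hlen]; omega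
      exact hne hd.symm
    rw [PySem.List.pyRange_one_eq_nil (by omega)]
    simp [aRec]
  | cons x d' ih =>
    intro a r ha hd
    have hlt : a.toNat < n.toNat := by
      by_contra hge
      push_neg at hge
      have h0 : (arr.take n.toNat).drop a.toNat = [] := by
        apply List.drop_eq_nil_of_le; omega
      rw [h0] at hd; exact List.cons_ne_nil x d' hd
    have hsplit : (arr.take n.toNat).drop a.toNat =
        (arr.take n.toNat)[a.toNat]'(by omega) :: (arr.take n.toNat).drop (a.toNat + 1) :=
      List.drop_eq_getElem_cons (by omega)
    rw [hsplit] at hd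
    injection hd with hx1 hd1
    have hx : x = PySem.List.pyGetD arr a 0 := by
      rw [hx1, PySem.List.pyGetD_eq_getElem _ 0 ha (by omega)]
      exact List.getElem_take
    have hd' : d' = (arr.take n.toNat).drop (a + 1).toNat := by
      rw [hd1]
      congr 1
      omega
    have hinner : ∀ r' : Int, (PySem.List.pyRange (a + 1) n 1).foldl
        (fun result j =>
          let temporal := PySem.List.pyGetD arr a 0 + PySem.List.pyGetD arr j 0
          if PySem.Int.mod temporal 2 == 0 then max result temporal else result)
        r' = pfold x d' r' := by
      intro r'
      have h := inner_fold arr n hn0 hn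
        (fun r y => if PySem.Int.mod (x + y) 2 == 0 then max r (x + y) else r) (a + 1) (by omega) r'
      rw [← hd'] at h
      rw [hx] at h ⊢
      exact h.trans (by rw [pfold])
    by_cases hend : a < n - 1
    · rw [PySem.List.pyRange_one_cons hend, List.foldl_cons]
      rw [show aRec (x :: d') r = aRec d' (pfold x d' r) from rfl]
      rw [← ih (a + 1) (pfold x d' r) (by omega) hd']
      congr 1
      exact hinner r
    · -- a = n - 1 : both the outer tail and the pair list for x are empty
      rw [PySem.List.pyRange_one_eq_nil (by omega)]
      have hd'nil : d' = [] := by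
        rw [hd']
        apply List.drop_eq_nil_of_le
        simp [hlen]; omega
      simp [aRec, hd'nil, pfold]

lemma take_max_toNat (arr : List Int) (n : Int) :
    arr.take (max n 0).toNat = arr.take n.toNat := by
  congr 1; omega

-- ===== VERDICT (by name: the statement is the Claim_ definition above) =====
theorem maxEvenSumPair_spec : Claim_equal_maxEvenSumPair := by
  intro arr n _hdom hpre
  unfold Spec_maxEvenSumPair maxEvenSumPair maxEvenSumPair_alt
  simp only [take_max_toNat, List.foldl_reverse]
  rw [show (fun (x : Int) (y : Int × Option Int × Option Int) => altStep y x) =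
        (fun x st => altStep st x) from rfl]
  rw [alt_invariant (arr.take n.toNat)]
  by_cases hn1 : n ≤ 1
  · rw [PySem.List.pyRange_one_eq_nil (by omega)]
    have h1 : (arr.take n.toNat).length ≤ 1 := by
      simp [List.length_take]; omega
    have hz : aRec (arr.take n.toNat) 0 = 0 := by
      cases h : arr.take n.toNat with
      | nil => simp [aRec]
      | cons x xs =>
        have hxs : xs = [] := by
          rw [h] at h1
          simp only [List.length_cons] at h1
          exact List.eq_nil_of_length_eq_zero (by omega)
        rw [hxs]
        simp [aRec, pfold]
    simp [hz]
  · rcases hpre with hle | hle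
    · rw [outer_fold arr n (by omega) hle (arr.take n.toNat) 0 0 le_rfl (by simp)]
      by_cases hz : aRec (arr.take n.toNat) 0 = 0
      · simp [hz]
      · simp [hz]
    · omega
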